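-- pv_equiv track=rewrite | github.com/sarbol/NewsArticles_Mining | utility.py | extract_event
-- ===== SOURCE A (Python) =====
-- def extract_event(text: str):
--     store = []
--     for line in text.split("\n"):
--         if ":" in line:
--             store.append(line.strip())
--
--     extraction = []
--     d = dict()
--     count = 0
--     while count < len(store):
--         for line in store:
--             pos = line.find(":")
--             if "eventcontext" in line[:pos].lower():
--                 if not d:
--                     d["eventContext"] = line[pos + 1:].strip().strip('"').strip(',').strip('"')
--                 else:
--                     extraction.append(d)
--                     d = dict()
--                     d["eventContext"] = line[pos + 1:].strip().strip('"').strip(',').strip('"')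
--             elif "eventdate" in line[:pos].lower():
--                 value = line[pos+1:].strip()
--                 d["eventDate"] = value.strip('"').strip(',').strip('"')
--             elif "eventtype" in line[:pos].lower():
--                 value = line[pos+1:].strip()
--                 d["eventType"] = value.strip('"').strip('"').strip(',').strip('"')
--             count += 1
--     extraction.append(d)
--     return extraction
-- ===== SOURCE B (Python) =====
-- _KEYS = (("eventcontext", "eventContext"),
--          ("eventdate", "eventDate"),
--          ("eventtype", "eventType"))
--
--
-- def _recognize(line):
--     # [] or a single (canonical key, cleaned value) pair, table-driven
--     pos = line.find(":")
--     head = line[:pos].lower()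
--     for needle, name in _KEYS:
--         if needle in head:
--             return [(name, line[pos + 1:].strip().strip('"').strip(',').strip('"'))]
--     return []
--
--
-- def _pairs(text):
--     out = []
--     for raw in text.split("\n"):
--         if ":" in raw:
--             out += _recognize(raw.strip())
--     return out
--
--
-- def _segments(pairs):
--     # split off everything up to the first non-initial eventContext pair, recurse
--     cut = next((i for i in range(1, len(pairs)) if pairs[i][0] == "eventContext"), None)
--     if cut is None:
--         return [pairs]
--     return [pairs[:cut]] + _segments(pairs[cut:])
--
--
-- def extract_event(text: str):
--     return [dict(seg) for seg in _segments(_pairs(text))]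
-- ===== Notes on version B (the rewrite author's own statement) =====
-- stated objective: alternative
-- what changed: A's single imperative scan that grows one mutable dict and flushes it whenever a non-first eventContext arrives (inside a redundant count-driven while loop) is replaced by a table-driven pair recognizer plus a recursive divide-and-conquer segmentation: find the first non-initial eventContext boundary, slice the pair list there, recurse on the remainder, and turn each slice into a dict with dict().
import Mathlib
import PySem

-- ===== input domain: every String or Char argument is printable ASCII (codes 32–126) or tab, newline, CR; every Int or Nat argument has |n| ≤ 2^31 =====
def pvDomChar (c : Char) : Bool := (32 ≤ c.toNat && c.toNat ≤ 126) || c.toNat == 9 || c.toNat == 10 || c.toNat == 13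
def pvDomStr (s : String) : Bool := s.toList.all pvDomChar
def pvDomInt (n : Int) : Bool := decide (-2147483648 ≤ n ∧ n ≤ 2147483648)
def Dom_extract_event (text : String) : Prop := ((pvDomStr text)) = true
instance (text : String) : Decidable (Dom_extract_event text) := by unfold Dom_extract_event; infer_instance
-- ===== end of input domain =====

-- B replaces A's single mutable-dict scan with a table-driven pair recognizer plus a
-- recursive split-at-first-boundary segmentation; objective: alternative, same cost.

-- ===== PORT A =====
-- the body of A's inner `for line in store` loop (state: extraction, d, count)
def pvA_step (st : List (List (String × String)) × PySem.Dict String String × Nat)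
    (line : String) : List (List (String × String)) × PySem.Dict String String × Nat :=
  let (extraction, d, count) := st
  let pos := PySem.Str.find line ":"
  if PySem.Str.isIn "eventcontext" (PySem.Str.lower (PySem.Str.slice line none (some pos))) then
    if d.items.isEmpty then
      (extraction,
       d.insert "eventContext"
         (PySem.Str.stripChars (PySem.Str.stripChars (PySem.Str.stripChars
            (PySem.Str.strip (PySem.Str.slice line (some (pos + 1)) none)) "\"") ",") "\""),
       count + 1)
    else
      (extraction ++ [d.items],
       ((PySem.Dict.empty : PySem.Dict String String)).insert "eventContext"
         (PySem.Str.stripChars (PySem.Str.stripChars (PySem.Str.stripChars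
            (PySem.Str.strip (PySem.Str.slice line (some (pos + 1)) none)) "\"") ",") "\""),
       count + 1)
  else if PySem.Str.isIn "eventdate" (PySem.Str.lower (PySem.Str.slice line none (some pos))) then
    let value := PySem.Str.strip (PySem.Str.slice line (some (pos + 1)) none)
    (extraction,
     d.insert "eventDate" (PySem.Str.stripChars (PySem.Str.stripChars (PySem.Str.stripChars value "\"") ",") "\""),
     count + 1)
  else if PySem.Str.isIn "eventtype" (PySem.Str.lower (PySem.Str.slice line none (some pos))) then
    let value := PySem.Str.strip (PySem.Str.slice line (some (pos + 1)) none)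
    (extraction,
     d.insert "eventType" (PySem.Str.stripChars (PySem.Str.stripChars (PySem.Str.stripChars
        (PySem.Str.stripChars value "\"") "\"") ",") "\""),
     count + 1)
  else
    (extraction, d, count + 1)

-- A's inner for loop over store
def pvA_for (store : List String)
    (st : List (List (String × String)) × PySem.Dict String String × Nat) :
    List (List (String × String)) × PySem.Dict String String × Nat :=
  store.foldl pvA_step st

-- termination helper for the while loop: each full for pass advances count by len(store)
theorem pvA_for_count (store : List String)
    (st : List (List (String × String)) × PySem.Dict String String × Nat) :
    (pvA_for store st).2.2 = st.2.2 + store.length := by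
  induction store generalizing st with
  | nil => simp [pvA_for]
  | cons line rest ih =>
    have hstep : (pvA_step st line).2.2 = st.2.2 + 1 := by
      obtain ⟨e, d, c⟩ := st
      simp only [pvA_step]
      split_ifs <;> rfl
    simp only [pvA_for, List.foldl_cons] at *
    rw [ih]
    simp [hstep, Nat.add_comm, Nat.add_left_comm]

-- A's `while count < len(store)` loop
def pvA_while (store : List String)
    (st : List (List (String × String)) × PySem.Dict String String × Nat) :
    List (List (String × String)) × PySem.Dict String String :=
  if _h : st.2.2 < store.length then
    pvA_while store (pvA_for store st)
  else (st.1, st.2.1)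
termination_by store.length - st.2.2
decreasing_by
  rw [pvA_for_count]
  omega

def extract_event (text : String) : List (List (String × String)) :=
  let store := ((PySem.Str.split? text "\n").getD []).foldl
    (fun s line => if PySem.Str.isIn ":" line then s ++ [PySem.Str.strip line] else s) []
  let (extraction, d) := pvA_while store ([], (PySem.Dict.empty : PySem.Dict String String), 0)
  extraction ++ [d.items]

-- ===== PORT B =====
-- the value-cleaning chain .strip().strip('"').strip(',').strip('"')
def pvB_clean (v : String) : String :=
  PySem.Str.stripChars (PySem.Str.stripChars (PySem.Str.stripChars (PySem.Str.strip v) "\"") ",") "\""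

-- the _KEYS lookup table
def pvB_KEYS : List (String × String) :=
  [("eventcontext", "eventContext"), ("eventdate", "eventDate"), ("eventtype", "eventType")]

-- the inner `for needle, name in _KEYS: if needle in head: … return` loop = first table hit
def pvB_keyOf (head : String) : Option (String × String) :=
  pvB_KEYS.find? (fun kv => PySem.Str.isIn kv.1 head)

-- _recognize: [] or the single recognized (canonical key, cleaned value) pair
def pvB_recognize (line : String) : List (String × String) :=
  match pvB_keyOf (PySem.Str.lower (PySem.Str.slice line none (some (PySem.Str.find line ":")))) with
  | some kv => [(kv.2, pvB_clean (PySem.Str.slice line (some (PySem.Str.find line ":" + 1)) none))]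
  | none => []

-- _pairs: recognized pairs of the ':'-containing lines, in order
def pvB_pairs (text : String) : List (String × String) :=
  ((PySem.Str.split? text "\n").getD []).foldl
    (fun out raw =>
      if PySem.Str.isIn ":" raw then out ++ pvB_recognize (PySem.Str.strip raw) else out) []

-- next((i for i in range(1, len(pairs)) if pairs[i][0] == "eventContext"), None)
def pvB_cut? (ps : List (String × String)) : Option Nat :=
  match ps with
  | [] => none
  | _ :: rest => (rest.findIdx? (fun kv => kv.1 == "eventContext")).map (· + 1)

-- termination helper for _segments: the cut index is ≥ 1, so the tail slice is shorter
theorem pvB_cut?_lt (ps : List (String × String)) (i : Nat) (h : pvB_cut? ps = some i) :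
    (ps.drop i).length < ps.length := by
  match ps with
  | [] => simp [pvB_cut?] at h
  | p :: rest =>
    simp only [pvB_cut?, Option.map_eq_some_iff] at h
    obtain ⟨j, hj, rfl⟩ := h
    simp [List.length_drop]

-- _segments: split off everything up to the first non-initial eventContext pair, recurse
def pvB_segments (ps : List (String × String)) : List (List (String × String)) :=
  match _h : pvB_cut? ps with
  | none => [ps]
  | some i => ps.take i :: pvB_segments (ps.drop i)
termination_by ps.length
decreasing_by exact pvB_cut?_lt ps i _h

def extract_event_alt (text : String) : List (List (String × String)) :=
  (pvB_segments (pvB_pairs text)).map (fun seg => (PySem.Dict.ofList seg).items)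

-- ===== PRECONDITION & SPEC =====
def Spec_extract_event (text : String) (out : List (List (String × String))) : Prop := out = extract_event_alt text
instance (text : String) (out : List (List (String × String))) : Decidable (Spec_extract_event text out) := by unfold Spec_extract_event; infer_instance

-- ===== CLAIM (what is proved, stated in full; the proofs are below) =====
def Claim_equal_extract_event : Prop := ∀ (text : String), Dom_extract_event text → Spec_extract_event text (extract_event text)

-- ===== LEMMAS AND PROOFS =====

-- stripping the same char set twice is the same as stripping once
theorem pv_strip2 {α : Type} (p : α → Bool) (l : List α) :
    (List.dropWhile p (List.dropWhile p ((List.dropWhile p (List.dropWhile p l).reverse).reverse)).reverse).reverse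
      = (List.dropWhile p (List.dropWhile p l).reverse).reverse := by
  generalize hA : List.dropWhile p l = A
  have h1 : List.dropWhile p (List.dropWhile p A.reverse).reverse = (List.dropWhile p A.reverse).reverse := by
    rcases hBr : (List.dropWhile p A.reverse).reverse with _ | ⟨x, xs⟩
    · simp
    · obtain ⟨pre, hpre⟩ := List.dropWhile_suffix (p := p) (l := A.reverse)
      have hAeq : A = x :: (xs ++ pre.reverse) := by
        have h := congrArg List.reverse hpre
        have h2 : (List.dropWhile p A.reverse).reverse = x :: xs := hBr
        simp only [List.reverse_append, List.reverse_reverse] at h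
        rw [h2] at h
        simpa using h.symm
      have hne : A ≠ [] := by simp [hAeq]
      have hx : p x = false := by
        have := List.head_dropWhile_not p (l := l) (by rw [hA]; exact hne)
        simp only [hA, hAeq, List.head_cons] at this
        exact this
      simp [hx]
  rw [h1, List.reverse_reverse, List.dropWhile_idempotent]

theorem pv_stripChars_idem (s c : List Char) :
    PySem.Chars.stripChars (PySem.Chars.stripChars s c) c = PySem.Chars.stripChars s c := by
  simp only [PySem.Chars.stripChars]
  exact pv_strip2 _ _

theorem pv_str_stripChars_idem (s c : String) :
    PySem.Str.stripChars (PySem.Str.stripChars s c) c = PySem.Str.stripChars s c := by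
  simp [PySem.Str.stripChars, pv_stripChars_idem]

-- pvB_recognize by cases on the three substring tests
theorem pvB_recognize_ctx (line : String)
    (h1 : PySem.Str.isIn "eventcontext" (PySem.Str.lower (PySem.Str.slice line none (some (PySem.Str.find line ":")))) = true) :
    pvB_recognize line = [("eventContext", pvB_clean (PySem.Str.slice line (some (PySem.Str.find line ":" + 1)) none))] := by
  unfold pvB_recognize pvB_keyOf pvB_KEYS
  rw [List.find?_cons_of_pos (by simpa using h1)]

theorem pvB_recognize_date (line : String)
    (h1 : PySem.Str.isIn "eventcontext" (PySem.Str.lower (PySem.Str.slice line none (some (PySem.Str.find line ":")))) = false)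
    (h2 : PySem.Str.isIn "eventdate" (PySem.Str.lower (PySem.Str.slice line none (some (PySem.Str.find line ":")))) = true) :
    pvB_recognize line = [("eventDate", pvB_clean (PySem.Str.slice line (some (PySem.Str.find line ":" + 1)) none))] := by
  unfold pvB_recognize pvB_keyOf pvB_KEYS
  rw [List.find?_cons_of_neg (by simpa using h1), List.find?_cons_of_pos (by simpa using h2)]

theorem pvB_recognize_type (line : String)
    (h1 : PySem.Str.isIn "eventcontext" (PySem.Str.lower (PySem.Str.slice line none (some (PySem.Str.find line ":")))) = false)
    (h2 : PySem.Str.isIn "eventdate" (PySem.Str.lower (PySem.Str.slice line none (some (PySem.Str.find line ":")))) = false)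
    (h3 : PySem.Str.isIn "eventtype" (PySem.Str.lower (PySem.Str.slice line none (some (PySem.Str.find line ":")))) = true) :
    pvB_recognize line = [("eventType", pvB_clean (PySem.Str.slice line (some (PySem.Str.find line ":" + 1)) none))] := by
  unfold pvB_recognize pvB_keyOf pvB_KEYS
  rw [List.find?_cons_of_neg (by simpa using h1), List.find?_cons_of_neg (by simpa using h2),
      List.find?_cons_of_pos (by simpa using h3)]

theorem pvB_recognize_none (line : String)
    (h1 : PySem.Str.isIn "eventcontext" (PySem.Str.lower (PySem.Str.slice line none (some (PySem.Str.find line ":")))) = false)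
    (h2 : PySem.Str.isIn "eventdate" (PySem.Str.lower (PySem.Str.slice line none (some (PySem.Str.find line ":")))) = false)
    (h3 : PySem.Str.isIn "eventtype" (PySem.Str.lower (PySem.Str.slice line none (some (PySem.Str.find line ":")))) = false) :
    pvB_recognize line = [] := by
  unfold pvB_recognize pvB_keyOf pvB_KEYS
  rw [List.find?_cons_of_neg (by simpa using h1), List.find?_cons_of_neg (by simpa using h2),
      List.find?_cons_of_neg (by simpa using h3)]
  rfl

-- A's store as filter+map
theorem pv_store_eq (raws : List String) (acc : List String) :
    raws.foldl (fun s line => if PySem.Str.isIn ":" line then s ++ [PySem.Str.strip line] else s) acc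
      = acc ++ (raws.filter (fun line => PySem.Str.isIn ":" line)).map PySem.Str.strip := by
  exact PySem.List.foldl_append_if _ _ raws acc

-- B's pairs as a flatMap over the recognized store lines
theorem pv_pairs_eq (text : String) :
    pvB_pairs text
      = ((((PySem.Str.split? text "\n").getD []).filter (fun line => PySem.Str.isIn ":" line)).map PySem.Str.strip).flatMap pvB_recognize := by
  unfold pvB_pairs
  have hfun : (fun (out : List (String × String)) raw =>
      if PySem.Str.isIn ":" raw then out ++ pvB_recognize (PySem.Str.strip raw) else out)
      = (fun (out : List (String × String)) raw =>
          out ++ (if PySem.Str.isIn ":" raw then pvB_recognize (PySem.Str.strip raw) else [])) := by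
    funext out raw
    by_cases h : PySem.Str.isIn ":" raw = true
    · rw [if_pos h, if_pos h]
    · rw [if_neg h, if_neg h]
      exact (List.append_nil out).symm
  rw [hfun, PySem.List.foldl_append_eq_flatMap]
  rw [List.nil_append]
  generalize (PySem.Str.split? text "\n").getD [] = raws
  induction raws with
  | nil => rw [List.flatMap_nil, List.filter_nil, List.map_nil, List.flatMap_nil]
  | cons r rs ih =>
    by_cases h : PySem.Str.isIn ":" r = true
    · rw [List.flatMap_cons, if_pos h, List.filter_cons_of_pos h, List.map_cons, List.flatMap_cons, ih]
    · rw [List.flatMap_cons, if_neg h, List.filter_cons_of_neg h, ih, List.nil_append]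

-- ghost grouping step used to characterise A's scan: flush on a non-first eventContext
def pvG_step (st : List (List (String × String)) × PySem.Dict String String)
    (kv : String × String) : List (List (String × String)) × PySem.Dict String String :=
  if kv.1 == "eventContext" && !st.2.items.isEmpty then
    (st.1 ++ [st.2.items], ((PySem.Dict.empty : PySem.Dict String String)).insert kv.1 kv.2)
  else
    (st.1, st.2.insert kv.1 kv.2)

-- one A-step = grouping the line's recognized pair(s), count advances by one
theorem pv_step_eq (line : String) (E : List (List (String × String)))
    (d : PySem.Dict String String) (c : Nat) :
    pvA_step (E, d, c) line = (((pvB_recognize line).foldl pvG_step (E, d)).1, ((pvB_recognize line).foldl pvG_step (E, d)).2, c + 1) := by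
  unfold pvA_step
  simp only []
  by_cases h1 : PySem.Str.isIn "eventcontext" (PySem.Str.lower (PySem.Str.slice line none (some (PySem.Str.find line ":")))) = true
  · rw [if_pos h1, pvB_recognize_ctx _ h1]
    simp only [List.foldl_cons, List.foldl_nil, pvG_step]
    by_cases hd : d.items.isEmpty = true
    · rw [if_pos hd, hd]
      simp [pvB_clean]
    · have hdf := Bool.eq_false_iff.mpr hd
      rw [if_neg hd, hdf]
      simp [pvB_clean]
  · have h1f := Bool.eq_false_iff.mpr h1
    rw [if_neg h1]
    by_cases h2 : PySem.Str.isIn "eventdate" (PySem.Str.lower (PySem.Str.slice line none (some (PySem.Str.find line ":")))) = true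
    · rw [if_pos h2, pvB_recognize_date _ h1f h2]
      simp only [List.foldl_cons, List.foldl_nil, pvG_step]
      simp [pvB_clean]
    · have h2f := Bool.eq_false_iff.mpr h2
      rw [if_neg h2]
      by_cases h3 : PySem.Str.isIn "eventtype" (PySem.Str.lower (PySem.Str.slice line none (some (PySem.Str.find line ":")))) = true
      · rw [if_pos h3, pvB_recognize_type _ h1f h2f h3]
        simp only [List.foldl_cons, List.foldl_nil, pvG_step]
        rw [pv_str_stripChars_idem]
        simp [pvB_clean]
      · have h3f := Bool.eq_false_iff.mpr h3
        rw [if_neg h3, pvB_recognize_none _ h1f h2f h3f]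
        rfl

-- A's single for pass = the grouping fold over the flattened pairs
theorem pv_for_eq (store : List String) (E : List (List (String × String)))
    (d : PySem.Dict String String) (c : Nat) :
    pvA_for store (E, d, c)
      = (((store.flatMap pvB_recognize).foldl pvG_step (E, d)).1,
         ((store.flatMap pvB_recognize).foldl pvG_step (E, d)).2, c + store.length) := by
  induction store generalizing E d c with
  | nil => simp [pvA_for]
  | cons line rest ih =>
    simp only [pvA_for, List.foldl_cons, List.flatMap_cons, List.foldl_append]
    rw [pv_step_eq]
    simp only [pvA_for] at ih
    rw [ih]
    have hc : c + 1 + rest.length = c + (rest.length + 1) := by omega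
    rw [hc, List.length_cons]

-- the while loop runs its for body exactly once (count jumps from 0 to len(store))
theorem pv_while_eq (store : List String) :
    pvA_while store ([], (PySem.Dict.empty : PySem.Dict String String), 0)
      = ((pvA_for store ([], (PySem.Dict.empty : PySem.Dict String String), 0)).1,
         (pvA_for store ([], (PySem.Dict.empty : PySem.Dict String String), 0)).2.1) := by
  rw [pvA_while]
  split_ifs with h
  · rw [pvA_while]
    have hc := pvA_for_count store ([], (PySem.Dict.empty : PySem.Dict String String), 0)
    split_ifs with h2
    · omega
    · rfl
  · rcases store with _ | ⟨a, as⟩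
    · rfl
    · exact absurd (by simp : (0:Nat) < (a :: as).length) h

-- equation lemmas for pvB_segments
theorem pvB_segments_none (ps : List (String × String)) (h : pvB_cut? ps = none) :
    pvB_segments ps = [ps] := by
  rw [pvB_segments]
  split <;> simp_all

theorem pvB_segments_some (ps : List (String × String)) (i : Nat) (h : pvB_cut? ps = some i) :
    pvB_segments ps = ps.take i :: pvB_segments (ps.drop i) := by
  rw [pvB_segments]
  split <;> simp_all

-- the grouping step acts on the groups accumulator by append only
theorem pvG_step_shift (G : List (List (String × String))) (c : PySem.Dict String String)
    (q : String × String) :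
    pvG_step (G, c) q = (G ++ (pvG_step ([], c) q).1, (pvG_step ([], c) q).2) := by
  simp only [pvG_step]
  split_ifs <;> simp

theorem pvG_foldl_shift (qs : List (String × String)) (G : List (List (String × String)))
    (c : PySem.Dict String String) :
    qs.foldl pvG_step (G, c) = (G ++ (qs.foldl pvG_step ([], c)).1, (qs.foldl pvG_step ([], c)).2) := by
  induction qs generalizing G c with
  | nil => simp
  | cons q qs ih =>
    simp only [List.foldl_cons]
    rcases hX : pvG_step ([], c) q with ⟨X1, X2⟩
    rw [pvG_step_shift G c q, hX]
    rw [ih (G ++ X1) X2, ih X1 X2]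
    simp [List.append_assoc]

-- on an empty current dict the step never flushes
theorem pvG_step_empty (G : List (List (String × String))) (q : String × String) :
    pvG_step (G, (PySem.Dict.empty : PySem.Dict String String)) q
      = (G, ((PySem.Dict.empty : PySem.Dict String String)).insert q.1 q.2) := by
  simp [pvG_step, PySem.Dict.empty]

-- a non-eventContext pair never flushes
theorem pvG_step_noctx (G : List (List (String × String))) (c : PySem.Dict String String)
    (q : String × String) (h : q.1 ≠ "eventContext") :
    pvG_step (G, c) q = (G, c.insert q.1 q.2) := by
  simp [pvG_step, h]

-- an eventContext pair with a non-empty current dict flushes it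
theorem pvG_step_flush (G : List (List (String × String))) (c : PySem.Dict String String)
    (q : String × String) (h : q.1 = "eventContext") (hne : c.items ≠ []) :
    pvG_step (G, c) q = (G ++ [c.items], ((PySem.Dict.empty : PySem.Dict String String)).insert q.1 q.2) := by
  simp [pvG_step, h, hne]

-- a run with no eventContext pair is a plain insert fold
theorem pvG_foldl_noctx (qs : List (String × String)) (G : List (List (String × String)))
    (c : PySem.Dict String String) (h : ∀ kv ∈ qs, kv.1 ≠ "eventContext") :
    qs.foldl pvG_step (G, c) = (G, qs.foldl (fun d kv => d.insert kv.1 kv.2) c) := by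
  induction qs generalizing c with
  | nil => simp
  | cons q qs ih =>
    simp only [List.foldl_cons]
    rw [pvG_step_noctx G c q (h q (by simp))]
    exact ih _ (fun kv hm => h kv (by simp [hm]))

-- inserting never empties the items list
theorem pv_insert_items_ne_nil (d : PySem.Dict String String) (k v : String) :
    (d.insert k v).items ≠ [] := by
  rw [PySem.Dict.items_insert]
  split_ifs with hc
  · intro hnil
    rw [List.map_eq_nil_iff] at hnil
    rw [PySem.Dict.contains_iff_mem_keys] at hc
    simp only [PySem.Dict.keys, hnil, List.map_nil] at hc
    exact absurd hc (List.not_mem_nil)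
  · simp

theorem pv_foldl_insert_items_ne_nil (qs : List (String × String)) (d : PySem.Dict String String)
    (h : d.items ≠ []) :
    (qs.foldl (fun d kv => d.insert kv.1 kv.2) d).items ≠ [] := by
  induction qs generalizing d with
  | nil => exact h
  | cons q qs ih => exact ih _ (pv_insert_items_ne_nil d q.1 q.2)

-- main bridge: the sequential grouping fold equals B's recursive segmentation
theorem pv_main (n : Nat) : ∀ ps : List (String × String), ps.length ≤ n →
    (ps.foldl pvG_step ([], (PySem.Dict.empty : PySem.Dict String String))).1
      ++ [(ps.foldl pvG_step ([], (PySem.Dict.empty : PySem.Dict String String))).2.items]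
      = (pvB_segments ps).map (fun seg => (PySem.Dict.ofList seg).items) := by
  induction n with
  | zero =>
    intro ps hl
    have hps : ps = [] := List.length_eq_zero_iff.mp (Nat.le_zero.mp hl)
    subst hps
    rw [pvB_segments_none [] (by simp [pvB_cut?])]
    simp [PySem.Dict.ofList, PySem.Dict.update, PySem.Dict.empty]
  | succ n ih =>
    intro ps hl
    match ps with
    | [] =>
      rw [pvB_segments_none [] (by simp [pvB_cut?])]
      simp [PySem.Dict.ofList, PySem.Dict.update, PySem.Dict.empty]
    | p :: rest =>
      cases hf : rest.findIdx? (fun kv => kv.1 == "eventContext") with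
      | none =>
        have hnc : ∀ kv ∈ rest, kv.1 ≠ "eventContext" := by
          intro kv hm
          have := (List.findIdx?_eq_none_iff.mp hf) kv hm
          simpa using this
        rw [pvB_segments_none (p :: rest) (by simp [pvB_cut?, hf])]
        simp only [List.foldl_cons]
        rw [pvG_step_empty, pvG_foldl_noctx rest [] _ hnc]
        simp [PySem.Dict.ofList, PySem.Dict.update]
      | some j =>
        have hcut : pvB_cut? (p :: rest) = some (j + 1) := by simp [pvB_cut?, hf]
        obtain ⟨hjlt, hjidx⟩ := List.findIdx?_eq_some_iff_findIdx_eq.mp hf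
        have hq : rest[j].1 = "eventContext" := by
          have := List.findIdx_getElem (p := fun kv => kv.1 == "eventContext") (xs := rest)
            (w := by rw [hjidx]; exact hjlt)
          simp only [hjidx] at this
          simpa using this
        have hbefore : ∀ kv ∈ rest.take j, kv.1 ≠ "eventContext" := by
          intro kv hm
          rw [List.mem_take_iff_getElem] at hm
          obtain ⟨m, hm', rfl⟩ := hm
          have hmj : m < j := lt_of_lt_of_le hm' (min_le_left _ _)
          have := List.not_of_lt_findIdx (p := fun kv => kv.1 == "eventContext") (xs := rest)
            (i := m) (by rw [hjidx]; exact hmj)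
          simpa using this
        have hdrop : rest.drop j = rest[j] :: rest.drop (j + 1) := List.drop_eq_getElem_cons hjlt
        rw [pvB_segments_some (p :: rest) (j + 1) hcut]
        -- unfold the fold along p, take j, rest[j], drop (j+1)
        have hsplit : rest = rest.take j ++ rest.drop j := (List.take_append_drop j rest).symm
        simp only [List.foldl_cons]
        rw [pvG_step_empty]
        conv_lhs => rw [hsplit, List.foldl_append, pvG_foldl_noctx _ [] _ hbefore, hdrop,
          List.foldl_cons]
        set dseg := (rest.take j).foldl (fun d kv => d.insert kv.1 kv.2)
          (((PySem.Dict.empty : PySem.Dict String String)).insert p.1 p.2) with hdseg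
        have hdne : dseg.items ≠ [] :=
          pv_foldl_insert_items_ne_nil _ _ (pv_insert_items_ne_nil _ _ _)
        rw [pvG_step_flush [] dseg rest[j] hq hdne, List.nil_append, pvG_foldl_shift]
        -- right side: first segment is dict(p :: take j rest)
        have htake : (p :: rest).take (j + 1) = p :: rest.take j := by simp
        have hdicteq : (PySem.Dict.ofList ((p :: rest).take (j + 1))).items = dseg.items := by
          rw [htake]
          simp [PySem.Dict.ofList, PySem.Dict.update, hdseg]
        -- tail: apply the induction hypothesis to the dropped suffix
        have hdrops : (p :: rest).drop (j + 1) = rest[j] :: rest.drop (j + 1) := by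
          simp [hdrop.symm]
        have hlen : ((p :: rest).drop (j + 1)).length ≤ n := by
          simp only [List.length_cons] at hl
          simp only [List.length_drop, List.length_cons]
          omega
        have hih := ih ((p :: rest).drop (j + 1)) hlen
        conv at hih => lhs; rw [hdrops]
        simp only [List.foldl_cons, pvG_step_empty] at hih
        rw [List.map_cons, hdicteq, ← hih]
        simp

-- the fold/segments bridge at the exact shape used in the verdict
theorem pv_group_eq_segments (ps : List (String × String)) :
    (ps.foldl pvG_step ([], (PySem.Dict.empty : PySem.Dict String String))).1
      ++ [(ps.foldl pvG_step ([], (PySem.Dict.empty : PySem.Dict String String))).2.items]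
      = (pvB_segments ps).map (fun seg => (PySem.Dict.ofList seg).items) :=
  pv_main ps.length ps (Nat.le_refl _)

-- ===== VERDICT (by name: the statement is the Claim_ definition above) =====
theorem extract_event_spec : Claim_equal_extract_event := by
  intro text _hdom
  simp only [Spec_extract_event, extract_event, extract_event_alt]
  rw [pv_store_eq, List.nil_append, pv_while_eq, pv_for_eq, pv_pairs_eq]
  exact pv_group_eq_segments _
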